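-- pv_equiv track=rewrite | github.com/pangeran-bottor/coding_challenges | codeforces/round_644_div_3/D.py | solve
-- ===== SOURCE A (Python) =====
-- def solve(n, k):
--     def is_prime(num):
--         if num == 1:
--             return False
--         i = 2
--         while i*i <= num:
--             if num % i == 0:
--                 return False
--             i += 1
--         return True
--
--     def max_div(num, k):
--         divisors = [1, num]
--         i = 2
--         while i*i <= num:
--             if num % i == 0:
--                 divisors.append(i)
--                 divisors.append(num//i)
--             i += 1
--         divisors.sort()
--
--         maxdiv = 1
--         for d in divisors:
--             if d <= k:
--                 maxdiv = max(maxdiv, d)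
--         return num // maxdiv
--
--
--     if n > k:
--         if is_prime(n):
--             return n
--         else:
--             return max_div(n, k)
--     return 1
-- ===== SOURCE B (Python) =====
-- def solve(n, k):
--     # single trial-division sweep: running minimum of n//d over divisors d <= k
--     best = 1 if n <= k else n
--     i = 2
--     while i * i <= n:
--         if n % i == 0:
--             j = n // i
--             if i <= k:
--                 best = min(best, j)
--             if j <= k:
--                 best = min(best, i)
--         i += 1
--     return best
-- ===== Notes on version B (the rewrite author's own statement) =====
-- stated objective: simpler
-- what changed: B replaces A's three passes (is_prime trial loop, build-then-sort a divisor list, scan it for the max divisor <= k, then divide) by one trial-division sweep that keeps a running minimum of the quotients n//d over divisors d <= k, with no primality test, no list, no sort and no n<=k branch beyond the initial value.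
import Mathlib
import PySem

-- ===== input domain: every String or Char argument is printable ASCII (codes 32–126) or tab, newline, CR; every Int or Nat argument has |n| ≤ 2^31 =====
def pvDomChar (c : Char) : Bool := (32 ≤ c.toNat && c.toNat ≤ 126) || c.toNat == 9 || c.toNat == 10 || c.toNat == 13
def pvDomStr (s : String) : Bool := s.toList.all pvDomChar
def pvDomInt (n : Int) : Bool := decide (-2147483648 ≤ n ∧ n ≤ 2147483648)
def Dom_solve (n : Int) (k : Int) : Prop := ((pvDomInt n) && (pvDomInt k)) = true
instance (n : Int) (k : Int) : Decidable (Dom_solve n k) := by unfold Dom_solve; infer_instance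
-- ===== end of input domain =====

-- B replaces A's three passes (is_prime loop, divisor-list build + sort, max scan) by one
-- trial-division sweep keeping a running minimum of the quotients n//d (objective: simpler).
-- Each 'while i*i <= num' loop is ported with a Nat fuel parameter that bounds its iteration
-- count ((num-1).toNat suffices since i ≤ num whenever i*i ≤ num); the fuel only makes the
-- recursion structural, the computation is the Python loop step for step.

-- ===== PORT A =====
def isPrimeLoop : Nat → Int → Int → Bool
  | 0, _, _ => true
  | fuel + 1, num, i =>
    if i * i ≤ num then
      if PySem.Int.mod num i == 0 then false
      else isPrimeLoop fuel num (i + 1)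
    else true

def isPrime (num : Int) : Bool :=
  if num == 1 then false else isPrimeLoop (num - 1).toNat num 2

def divLoop : Nat → Int → Int → List Int → List Int
  | 0, _, _, acc => acc
  | fuel + 1, num, i, acc =>
    if i * i ≤ num then
      divLoop fuel num (i + 1)
        (if PySem.Int.mod num i == 0 then acc ++ [i, PySem.Int.floordiv num i] else acc)
    else acc

def maxDiv (num : Int) (k : Int) : Int :=
  let divisors := PySem.List.sorted (divLoop (num - 1).toNat num 2 [1, num]) (fun x => x) false
  let maxdiv := divisors.foldl (fun m d => if d ≤ k then max m d else m) 1
  PySem.Int.floordiv num maxdiv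

def solve (n : Int) (k : Int) : Int :=
  if n > k then
    if isPrime n then n else maxDiv n k
  else 1

-- ===== PORT B =====
def bLoop : Nat → Int → Int → Int → Int → Int
  | 0, _, _, _, best => best
  | fuel + 1, n, k, i, best =>
    if i * i ≤ n then
      bLoop fuel n k (i + 1)
        (if PySem.Int.mod n i == 0 then
          let j := PySem.Int.floordiv n i
          let b1 := if i ≤ k then min best j else best
          if j ≤ k then min b1 i else b1
        else best)
    else best

def solve_alt (n : Int) (k : Int) : Int :=
  bLoop (n - 1).toNat n k 2 (if n ≤ k then 1 else n)

-- ===== PRECONDITION & SPEC =====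
def Spec_solve (n : Int) (k : Int) (out : Int) : Prop := out = solve_alt n k
instance (n : Int) (k : Int) (out : Int) : Decidable (Spec_solve n k out) := by unfold Spec_solve; infer_instance

-- ===== CLAIM (what is proved, stated in full; the proofs are below) =====
def Claim_equal_solve : Prop := ∀ (n : Int) (k : Int), Dom_solve n k → Spec_solve n k (solve n k)

-- ===== LEMMAS AND PROOFS =====

-- the max-accumulating step of A's final scan
def fmax (k : Int) (m : Int) (d : Int) : Int := if d ≤ k then max m d else m

theorem fmax_def (k : Int) : (fun m d => if d ≤ k then max m d else m) = fmax k := rfl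

theorem fmax_le (k m d : Int) : m ≤ fmax k m d := by
  unfold fmax; split <;> simp

theorem fmax_dvd {k m d num : Int} (hm : m ∣ num) (hd : d ∣ num) : fmax k m d ∣ num := by
  unfold fmax; split
  · rcases max_choice m d with h | h <;> rw [h] <;> assumption
  · exact hm

theorem le_foldl_fmax (k : Int) (xs : List Int) (m : Int) : m ≤ xs.foldl (fmax k) m := by
  induction xs generalizing m with
  | nil => simp
  | cons d xs ih => exact le_trans (fmax_le k m d) (ih _)

theorem foldl_fmax_max (k : Int) (xs : List Int) (a b : Int) :
    xs.foldl (fmax k) (max a b) = max a (xs.foldl (fmax k) b) := by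
  induction xs generalizing b with
  | nil => simp
  | cons d xs ih =>
      have h : fmax k (max a b) d = max a (fmax k b d) := by
        unfold fmax; split
        · rw [max_assoc]
        · rfl
      simp only [List.foldl_cons, h, ih]

theorem foldl_fmax_comm (k : Int) (xs ys : List Int) (h : xs.Perm ys) (m : Int) :
    xs.foldl (fmax k) m = ys.foldl (fmax k) m := by
  apply h.foldl_eq'
  intro a _ b _ c
  unfold fmax
  by_cases hak : a ≤ k <;> by_cases hbk : b ≤ k <;>
    simp [hak, hbk, max_assoc, max_comm a b]

theorem foldl_fmax_dvd {k num : Int} {xs : List Int} (h : ∀ d ∈ xs, d ∣ num) :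
    ∀ m, m ∣ num → xs.foldl (fmax k) m ∣ num := by
  induction xs with
  | nil => intro m hm; simpa using hm
  | cons d xs ih =>
      intro m hm
      simp only [List.foldl_cons]
      exact ih (fun e he => h e (by simp [he])) _ (fmax_dvd hm (h d (by simp)))

theorem ediv_antitone {num a b : Int} (hn : 1 ≤ num) (ha : 1 ≤ a) (hab : a ≤ b)
    (hbd : b ∣ num) : num / b ≤ num / a := by
  have ha0 : 0 < a := by omega
  have hnb : 0 ≤ num / b := Int.ediv_nonneg (by omega) (by omega)
  rw [Int.le_ediv_iff_mul_le ha0]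
  calc num / b * a ≤ num / b * b := by exact mul_le_mul_of_nonneg_left hab hnb
    _ = num := Int.ediv_mul_cancel hbd

theorem ediv_max {num a b : Int} (hn : 1 ≤ num) (ha : 1 ≤ a) (hb : 1 ≤ b)
    (had : a ∣ num) (hbd : b ∣ num) : num / max a b = min (num / a) (num / b) := by
  rcases le_total a b with h | h
  · rw [max_eq_right h, min_eq_right (ediv_antitone hn ha h hbd)]
  · rw [max_eq_left h, min_eq_left (ediv_antitone hn hb h had)]

theorem divLoop_acc (num : Int) : ∀ (fuel : Nat) (i : Int) (acc : List Int),
    divLoop fuel num i acc = acc ++ divLoop fuel num i [] := by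
  intro fuel
  induction fuel with
  | zero => intro i acc; simp [divLoop]
  | succ fuel IH =>
    intro i acc
    rw [divLoop, divLoop]
    by_cases h : i * i ≤ num
    · simp only [if_pos h]
      rw [IH (i + 1), IH (i + 1)
          (if PySem.Int.mod num i == 0 then ([] : List Int) ++ [i, PySem.Int.floordiv num i] else [])]
      split <;> simp
    · simp [h]

theorem divLoop_mem {num : Int} (hn : 1 ≤ num) : ∀ (fuel : Nat) (i : Int), 2 ≤ i →
    ∀ d ∈ divLoop fuel num i [], d ∣ num ∧ 2 ≤ d := by
  intro fuel
  induction fuel with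
  | zero => intro i _ d hd; simp [divLoop] at hd
  | succ fuel IH =>
    intro i hi d hd
    rw [divLoop] at hd
    by_cases h : i * i ≤ num
    · simp only [if_pos h] at hd
      rw [divLoop_acc num fuel (i + 1)] at hd
      rcases List.mem_append.mp hd with hd | hd
      · by_cases hm : PySem.Int.mod num i == 0
        · have hdvd : i ∣ num := (PySem.Int.mod_eq_zero_iff_dvd num i).mp (by simpa using hm)
          simp only [if_pos hm, List.nil_append, List.mem_cons] at hd
          have hfd : PySem.Int.floordiv num i = num / i :=
            PySem.Int.floordiv_eq_ediv_of_pos (by omega)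
          have hjdvd : num / i ∣ num := ⟨i, (Int.ediv_mul_cancel hdvd).symm⟩
          have hij : i ≤ num / i := by
            rw [Int.le_ediv_iff_mul_le (by omega : (0:Int) < i)]; exact h
          rcases hd with rfl | hd
          · exact ⟨hdvd, hi⟩
          · rcases hd with rfl | hd
            · rw [hfd]; exact ⟨hjdvd, by omega⟩
            · simp at hd
        · simp [hm] at hd
      · exact IH (i + 1) (by omega) d hd
    · simp [h] at hd

theorem bLoop_of_prime (n k : Int) : ∀ (fuel : Nat) (i best : Int),
    isPrimeLoop fuel n i = true → bLoop fuel n k i best = best := by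
  intro fuel
  induction fuel with
  | zero => intro i best _; rfl
  | succ fuel IH =>
    intro i best hp
    rw [isPrimeLoop] at hp
    rw [bLoop]
    by_cases h : i * i ≤ n
    · simp only [if_pos h] at hp ⊢
      by_cases hm : PySem.Int.mod n i == 0
      · simp [hm] at hp
      · simp only [if_neg hm] at hp ⊢
        exact IH (i + 1) best hp
    · simp [h]

theorem bLoop_eq (n k : Int) (hn : 1 ≤ n) : ∀ (fuel : Nat) (i best : Int), 2 ≤ i → best ≤ n →
    bLoop fuel n k i best = min best (n / ((divLoop fuel n i []).foldl (fmax k) 1)) := by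
  intro fuel
  induction fuel with
  | zero =>
    intro i best _ hb
    simp only [bLoop, divLoop, List.foldl_nil, Int.ediv_one, min_eq_left hb]
  | succ fuel IH =>
    intro i best hi hb
    rw [bLoop, divLoop]
    by_cases h : i * i ≤ n
    · have hi0 : (0:Int) < i := by omega
      simp only [if_pos h]
      rw [divLoop_acc n fuel (i + 1)]
      set D := divLoop fuel n (i + 1) [] with hD
      have hMdvd : ∀ m, m ∣ n → D.foldl (fmax k) m ∣ n :=
        foldl_fmax_dvd (fun d hd => (divLoop_mem hn fuel (i + 1) (by omega) d hd).1)
      have hM1 : (1:Int) ≤ D.foldl (fmax k) 1 := le_foldl_fmax k D 1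
      by_cases hm : PySem.Int.mod n i == 0
      · have hdvd : i ∣ n := (PySem.Int.mod_eq_zero_iff_dvd n i).mp (by simpa using hm)
        obtain ⟨t, ht⟩ := hdvd
        have hdvd : i ∣ n := ⟨t, ht⟩
        have hfd : PySem.Int.floordiv n i = n / i :=
          PySem.Int.floordiv_eq_ediv_of_pos hi0
        have hti : n / i = t := by rw [ht]; exact Int.mul_ediv_cancel_left t (by omega)
        have hjdvd : n / i ∣ n := ⟨i, (Int.ediv_mul_cancel hdvd).symm⟩
        have hij : i ≤ n / i := by
          rw [Int.le_ediv_iff_mul_le hi0]; exact h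
        have hji : n / (n / i) = i := by
          rw [hti, ht, mul_comm]
          exact Int.mul_ediv_cancel_left i (by omega)
        simp only [if_pos hm, hfd]
        set c : Int := fmax k (fmax k 1 i) (n / i) with hc
        have hc1 : (1:Int) ≤ c := le_trans (fmax_le k 1 i) (fmax_le k _ (n / i))
        have hcdvd : c ∣ n := fmax_dvd (fmax_dvd (one_dvd n) hdvd) hjdvd
        have hfoldc : (([i, n / i] ++ D).foldl (fmax k) 1) = max c (D.foldl (fmax k) 1) := by
          simp only [List.foldl_append, List.foldl_cons, List.foldl_nil, ← hc]
          calc D.foldl (fmax k) c = D.foldl (fmax k) (max c 1) := by rw [max_eq_left hc1]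
            _ = max c (D.foldl (fmax k) 1) := foldl_fmax_max k D c 1
        have hkey : (if n / i ≤ k then min (if i ≤ k then min best (n / i) else best) i
                     else if i ≤ k then min best (n / i) else best) = min best (n / c) := by
          by_cases hik : i ≤ k <;> by_cases hjk : n / i ≤ k
          · have hcv : c = n / i := by
              rw [hc]; unfold fmax; split_ifs <;> omega
            rw [if_pos hjk, if_pos hik, hcv, hji]; omega
          · have hcv : c = i := by
              rw [hc]; unfold fmax; split_ifs <;> omega
            rw [if_neg hjk, if_pos hik, hcv]
          · have hcv : c = n / i := by
              rw [hc]; unfold fmax; split_ifs <;> omega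
            rw [if_pos hjk, if_neg hik, hcv, hji]
          · have hcv : c = 1 := by
              rw [hc]; unfold fmax; split_ifs <;> omega
            rw [if_neg hjk, if_neg hik, hcv, Int.ediv_one]; omega
        rw [hkey]
        rw [IH (i + 1) (min best (n / c)) (by omega) (le_trans (min_le_left _ _) hb)]
        simp only [List.nil_append]
        rw [hfoldc, ediv_max hn hc1 hM1 hcdvd (hMdvd 1 (one_dvd n)), min_assoc]
      · simp only [if_neg hm, List.nil_append]
        exact IH (i + 1) best (by omega) hb
    · simp only [if_neg h, List.foldl_nil, Int.ediv_one, min_eq_left hb]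

theorem isPrime_false_pos {n : Int} (h : isPrime n = false) : 1 ≤ n := by
  by_contra hlt
  unfold isPrime at h
  rw [if_neg (by simp; omega)] at h
  rw [show (n - 1).toNat = 0 from by omega] at h
  simp [isPrimeLoop] at h

-- ===== VERDICT (by name: the statement is the Claim_ definition above) =====
theorem solve_spec : Claim_equal_solve := by
  intro n k _
  unfold Spec_solve solve solve_alt
  by_cases hnk : n > k
  · rw [if_pos hnk, if_neg (by omega : ¬ n ≤ k)]
    by_cases hp : isPrime n = true
    · rw [if_pos hp]
      have hp2 : isPrimeLoop (n - 1).toNat n 2 = true := by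
        unfold isPrime at hp
        split at hp
        · exact absurd hp (by simp)
        · exact hp
      rw [bLoop_of_prime n k _ 2 n hp2]
    · rw [if_neg hp]
      have hpf : isPrime n = false := by simpa using hp
      have hn : (1:Int) ≤ n := isPrime_false_pos hpf
      unfold maxDiv
      simp only [fmax_def]
      rw [foldl_fmax_comm k _ _ (PySem.List.sorted_perm _ _ _) 1]
      rw [divLoop_acc n _ 2]
      have h1 : fmax k (1:Int) 1 = 1 := by unfold fmax; split <;> simp
      have h2 : fmax k (1:Int) n = 1 := by unfold fmax; rw [if_neg (by omega)]
      have hfold : (([1, n] ++ divLoop (n - 1).toNat n 2 []).foldl (fmax k) 1)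
          = (divLoop (n - 1).toNat n 2 []).foldl (fmax k) 1 := by
        simp only [List.foldl_append, List.foldl_cons, List.foldl_nil, h1, h2]
      rw [hfold]
      have hM1 : (1:Int) ≤ (divLoop (n - 1).toNat n 2 []).foldl (fmax k) 1 :=
        le_foldl_fmax k _ 1
      rw [PySem.Int.floordiv_eq_ediv_of_pos (by omega)]
      rw [bLoop_eq n k hn _ 2 n (by omega) le_rfl]
      rw [min_eq_right (Int.ediv_le_self _ (by omega))]
  · rw [if_neg hnk, if_pos (by omega : n ≤ k)]
    by_cases hn : (1:Int) ≤ n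
    · rw [bLoop_eq n k hn _ 2 1 (by omega) (by omega)]
      have hM1 : (1:Int) ≤ (divLoop (n - 1).toNat n 2 []).foldl (fmax k) 1 :=
        le_foldl_fmax k _ 1
      have hMdvd : (divLoop (n - 1).toNat n 2 []).foldl (fmax k) 1 ∣ n :=
        foldl_fmax_dvd (fun d hd => (divLoop_mem hn _ 2 (by omega) d hd).1) 1 (one_dvd n)
      have hMn : (divLoop (n - 1).toNat n 2 []).foldl (fmax k) 1 ≤ n :=
        Int.le_of_dvd (by omega) hMdvd
      have h1 : (1:Int) ≤ n / ((divLoop (n - 1).toNat n 2 []).foldl (fmax k) 1) := by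
        rw [Int.le_ediv_iff_mul_le (by omega)]; omega
      omega
    · rw [show (n - 1).toNat = 0 from by omega, bLoop]
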